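-- pv_equiv track=rewrite | github.com/Stefan-Endres/hyperct | hyperct/_vis_disc.py | _order_trees_final
-- ===== SOURCE A (Python) =====
-- from collections import deque
-- import operator
--
-- def _order_trees_final(tree_value_list):
--     mylist = sorted(tree_value_list, key=operator.itemgetter(0))
--     neworder = deque()
--     for i, item in enumerate(mylist):
--         if i % 2 == 0:
--             neworder.append(item[1])
--         else:
--             neworder.appendleft(item[1])
--     return list(neworder)
-- ===== SOURCE B (Python) =====
-- import operator
--
-- def _order_trees_final(tree_value_list):
--     mylist = sorted(tree_value_list, key=operator.itemgetter(0))
--     evens = mylist[0::2]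
--     odds = mylist[1::2]
--     return [item[1] for item in reversed(odds)] + [item[1] for item in evens]
-- ===== Notes on version B (the rewrite author's own statement) =====
-- stated objective: simpler
-- what changed: Replaces the deque with alternating append/appendleft and the i%2 branch by two step-2 slices of the sorted list: the odd-indexed values reversed, concatenated with the even-indexed values.
import Mathlib
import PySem

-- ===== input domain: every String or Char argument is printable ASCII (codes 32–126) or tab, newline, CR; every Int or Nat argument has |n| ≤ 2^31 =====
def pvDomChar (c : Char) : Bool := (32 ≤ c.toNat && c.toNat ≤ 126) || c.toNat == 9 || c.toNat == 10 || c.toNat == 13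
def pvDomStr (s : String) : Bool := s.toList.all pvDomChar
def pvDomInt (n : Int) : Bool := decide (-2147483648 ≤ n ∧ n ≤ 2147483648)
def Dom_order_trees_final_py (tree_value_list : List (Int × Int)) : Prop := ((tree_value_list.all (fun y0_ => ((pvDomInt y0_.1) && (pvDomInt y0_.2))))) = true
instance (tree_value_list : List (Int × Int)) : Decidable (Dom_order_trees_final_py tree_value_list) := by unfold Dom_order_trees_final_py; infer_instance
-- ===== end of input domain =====

-- B replaces A's deque with its alternating append/appendleft and i%2 branch by two
-- step-2 slices of the sorted list (odd-indexed values reversed ++ even-indexed values);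
-- objective: simpler, same output.

-- ===== PORT A =====
-- the deque is modeled as a List Int: append = d ++ [x], appendleft = x :: d (exact);
-- the for-loop over enumerate(mylist) is this recursion carrying the index i and the deque d.
def otfLoop (i : Nat) (d : List Int) : List (Int × Int) → List Int
  | [] => d
  | item :: rest =>
    if i % 2 = 0 then otfLoop (i + 1) (d ++ [item.2]) rest
    else otfLoop (i + 1) (item.2 :: d) rest

def order_trees_final_py (tree_value_list : List (Int × Int)) : List Int :=
  let mylist := PySem.List.sorted tree_value_list (fun p => p.1) false
  otfLoop 0 [] mylist

-- ===== PORT B =====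
def order_trees_final_py_alt (tree_value_list : List (Int × Int)) : List Int :=
  let mylist := PySem.List.sorted tree_value_list (fun p => p.1) false
  let evens := (PySem.List.slice? mylist (some 0) none 2).getD []   -- mylist[0::2]
  let odds := (PySem.List.slice? mylist (some 1) none 2).getD []    -- mylist[1::2]
  odds.reverse.map (fun item => item.2) ++ evens.map (fun item => item.2)

-- ===== PRECONDITION & SPEC =====
def Spec_order_trees_final_py (tree_value_list : List (Int × Int)) (out : List Int) : Prop := out = order_trees_final_py_alt tree_value_list
instance (tree_value_list : List (Int × Int)) (out : List Int) : Decidable (Spec_order_trees_final_py tree_value_list out) := by unfold Spec_order_trees_final_py; infer_instance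

-- ===== CLAIM (what is proved, stated in full; the proofs are below) =====
def Claim_equal_order_trees_final_py : Prop := ∀ (tree_value_list : List (Int × Int)), Dom_order_trees_final_py tree_value_list → Spec_order_trees_final_py tree_value_list (order_trees_final_py tree_value_list)

-- ===== LEMMAS AND PROOFS =====

-- every other element of a list, starting with the first
def pvEO {α : Type} : List α → List α
  | [] => []
  | [a] => [a]
  | a :: _ :: t => a :: pvEO t

theorem pvEO_cons {α : Type} (x : α) (t : List α) : pvEO (x :: t) = x :: pvEO t.tail := by
  cases t <;> simp [pvEO]

theorem pvN1 {α : Type} (xs : List α) :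
    (List.range ((xs.length + 1) / 2)).filterMap (fun k => xs[2 * k]?) = pvEO xs := by
  induction xs using pvEO.induct with
  | case1 => simp [pvEO]
  | case2 a => simp [pvEO, List.range_succ]
  | case3 a b t ih =>
    have hlen : ((a :: b :: t).length + 1) / 2 = (t.length + 1) / 2 + 1 := by
      simp only [List.length_cons]; omega
    rw [hlen, List.range_succ_eq_map, List.filterMap_cons, List.filterMap_map]
    have hfun : ∀ k ∈ List.range ((t.length + 1) / 2),
        ((fun k => (a :: b :: t)[2 * k]?) ∘ Nat.succ) k = (fun k => t[2 * k]?) k := by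
      intro k _
      have h2 : 2 * Nat.succ k = 2 * k + 1 + 1 := by omega
      simp [h2]
    rw [List.filterMap_congr hfun, ih]
    simp [pvEO]

theorem pvSlice0 {α : Type} (xs : List α) :
    PySem.List.slice? xs (some 0) none 2 = some (pvEO xs) := by
  rw [← pvN1]
  simp only [PySem.List.slice?, PySem.List.sliceIndices]
  norm_num
  have hcnt : (if 0 < xs.length then (((xs.length : Int) + 2 - 1) / 2).toNat else 0)
      = (xs.length + 1) / 2 := by split <;> omega
  rw [hcnt]
  apply List.filterMap_congr
  intro k _
  have h2 : ((2 : Int) * (k : Int)).toNat = 2 * k := by omega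
  rw [h2]

theorem pvSlice1 {α : Type} (xs : List α) :
    PySem.List.slice? xs (some 1) none 2 = some (pvEO xs.tail) := by
  cases xs with
  | nil => simp [PySem.List.slice?, PySem.List.sliceIndices, pvEO]
  | cons x t =>
    rw [show (x :: t).tail = t from rfl, ← pvN1]
    simp only [PySem.List.slice?, PySem.List.sliceIndices]
    norm_num
    have hcnt : (if 0 < t.length then (((t.length : Int) + 2 - 1) / 2).toNat else 0)
        = (t.length + 1) / 2 := by split <;> omega
    rw [hcnt]
    apply List.filterMap_congr
    intro k _
    have h2 : ((1 : Int) + 2 * (k : Int)).toNat = 2 * k + 1 := by omega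
    rw [h2]
    simp

theorem pvLoop (xs : List (Int × Int)) : ∀ (i : Nat) (d : List Int), i % 2 = 0 →
    otfLoop i d xs = (pvEO xs.tail).reverse.map (fun item => item.2) ++ d
      ++ (pvEO xs).map (fun item => item.2) := by
  induction xs using pvEO.induct with
  | case1 => intro i d h; simp [otfLoop, pvEO]
  | case2 a => intro i d h; simp [otfLoop, pvEO, h]
  | case3 a b t ih =>
    intro i d h
    have h1 : ¬ (i + 1) % 2 = 0 := by omega
    have h2 : (i + 1 + 1) % 2 = 0 := by omega
    show (if i % 2 = 0 then otfLoop (i + 1) (d ++ [a.2]) (b :: t)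
          else otfLoop (i + 1) (a.2 :: d) (b :: t)) = _
    rw [if_pos h]
    show (if (i + 1) % 2 = 0 then otfLoop (i + 1 + 1) ((d ++ [a.2]) ++ [b.2]) t
          else otfLoop (i + 1 + 1) (b.2 :: (d ++ [a.2])) t) = _
    rw [if_neg h1, ih _ _ h2]
    rw [show (a :: b :: t).tail = b :: t from rfl, pvEO_cons]
    simp [pvEO, List.append_assoc]

theorem pvMain (xs : List (Int × Int)) :
    otfLoop 0 [] xs =
      ((PySem.List.slice? xs (some 1) none 2).getD []).reverse.map (fun item => item.2) ++
        ((PySem.List.slice? xs (some 0) none 2).getD []).map (fun item => item.2) := by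
  rw [pvSlice0, pvSlice1]
  simp only [Option.getD_some]
  have h := pvLoop xs 0 [] rfl
  simpa using h

-- ===== VERDICT (by name: the statement is the Claim_ definition above) =====
theorem order_trees_final_py_spec : Claim_equal_order_trees_final_py := by
  intro l _
  exact pvMain (PySem.List.sorted l (fun p => p.1) false)
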